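-- pv_equiv track=rewrite | github.com/b0ydeptraj/Relay-kit | relay_kit_v3/pulse.py | _publication_drilldown
-- ===== SOURCE A (Python) =====
-- from typing import Any, Callable, Mapping
--
-- DRILLDOWN_LIMIT = 8
--
-- def _publication_drilldown(publication: Mapping[str, Any]) -> list[dict[str, str]]:
--     items = _finding_drilldown_items(publication.get("findings"), default_id="publication")
--     for check in _list(publication.get("checks")):
--         if not isinstance(check, Mapping):
--             continue
--         status = str(check.get("status", "unknown"))
--         if status == "pass":
--             continue
--         check_id = str(check.get("id", check.get("gate", "publication")))
--         items.append(
--             {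
--                 "kind": "check",
--                 "id": check_id,
--                 "status": status,
--                 "summary": str(check.get("summary", check_id)),
--             }
--         )
--     return _dedupe_drilldown(items)[:DRILLDOWN_LIMIT]
--
-- def _finding_drilldown_items(value: Any, *, default_id: str) -> list[dict[str, str]]:
--     items: list[dict[str, str]] = []
--     for finding in _list(value):
--         if not isinstance(finding, Mapping):
--             continue
--         finding_id = str(finding.get("gate", finding.get("id", default_id)))
--         items.append(
--             {
--                 "kind": "finding",
--                 "id": finding_id,
--                 "status": str(finding.get("status", "attention")),
--                 "summary": str(finding.get("summary", finding.get("message", finding_id))),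
--             }
--         )
--     return items
--
-- def _dedupe_drilldown(items: list[dict[str, str]]) -> list[dict[str, str]]:
--     seen: set[tuple[str, str]] = set()
--     deduped: list[dict[str, str]] = []
--     for item in items:
--         key = (item.get("id", ""), item.get("summary", ""))
--         if key in seen:
--             continue
--         seen.add(key)
--         deduped.append(item)
--     return deduped
--
-- def _list(value: Any) -> list[Any]:
--     return value if isinstance(value, list) else []
-- ===== SOURCE B (Python) =====
-- from typing import Any, Mapping
--
-- DRILLDOWN_LIMIT = 8
--
-- def _finding_cand(finding):
--     fid = str(finding.get("gate", finding.get("id", "publication")))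
--     summary = str(finding.get("summary", finding.get("message", fid)))
--     return ((fid, summary),
--             {"kind": "finding", "id": fid,
--              "status": str(finding.get("status", "attention")),
--              "summary": summary})
--
-- def _check_cands(check):
--     status = str(check.get("status", "unknown"))
--     if status == "pass":
--         return []
--     cid = str(check.get("id", check.get("gate", "publication")))
--     summary = str(check.get("summary", cid))
--     return [((cid, summary),
--              {"kind": "check", "id": cid, "status": status, "summary": summary})]
--
-- def _take_unique(cands, n):
--     # erase-based dedup fused with the cap: keep the head, delete every later
--     # candidate sharing its key, recurse with one slot fewer.
--     if n == 0 or not cands: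
--         return []
--     key, item = cands[0]
--     rest = [(k, it) for (k, it) in cands[1:] if k != key]
--     return [item] + _take_unique(rest, n - 1)
--
-- def _publication_drilldown(publication: Mapping[str, Any]) -> list:
--     findings = publication.get("findings")
--     checks = publication.get("checks")
--     cands = [_finding_cand(f)
--              for f in (findings if isinstance(findings, list) else [])
--              if isinstance(f, Mapping)]
--     for c in (checks if isinstance(checks, list) else []):
--         if isinstance(c, Mapping):
--             cands += _check_cands(c)
--     return _take_unique(cands, DRILLDOWN_LIMIT)
-- ===== Notes on version B (the rewrite author's own statement) =====
-- stated objective: alternative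
-- what changed: Replaced A's seen-set dedupe followed by a [:8] slice with an erase-based recursive dedup fused with the cap: keep the head candidate, filter every later candidate with the same (id,summary) key out of the remainder, and recurse with one slot fewer, stopping at 8; no auxiliary set and no slicing.
import Mathlib
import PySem

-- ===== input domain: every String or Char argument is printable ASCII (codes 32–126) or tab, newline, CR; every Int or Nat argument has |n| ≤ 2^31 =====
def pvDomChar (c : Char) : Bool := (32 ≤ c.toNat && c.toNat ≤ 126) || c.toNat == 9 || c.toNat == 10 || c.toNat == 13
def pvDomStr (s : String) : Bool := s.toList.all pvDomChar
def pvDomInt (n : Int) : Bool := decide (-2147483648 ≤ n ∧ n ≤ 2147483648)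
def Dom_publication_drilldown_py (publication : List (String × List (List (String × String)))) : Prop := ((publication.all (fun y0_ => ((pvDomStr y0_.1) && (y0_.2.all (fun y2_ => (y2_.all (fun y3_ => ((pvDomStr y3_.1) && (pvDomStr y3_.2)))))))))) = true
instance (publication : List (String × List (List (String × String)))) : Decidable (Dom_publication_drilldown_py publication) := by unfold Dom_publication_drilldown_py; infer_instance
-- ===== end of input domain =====

-- B replaces A's seen-set dedupe + [:8] slice by an erase-based recursive dedup fused with
-- the cap (keep head, filter out later same-key candidates, recurse with one slot fewer).

-- ===== PORT A =====
-- A, transliterated: _finding_drilldown_items, the checks loop, _dedupe_drilldown, then [:8].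
-- `isinstance(x, Mapping)` / `isinstance(value, list)` are vacuously true under the typed
-- encoding (dict values are lists of dicts); `x.get(k, d)` is PySem.Dict.getD ⟨x⟩ k d;
-- `str()` is the identity on the str-typed values; missing top-level key → Option, `_list` of None → [].

def pvFindingItem (default_id : String) (f : List (String × String)) : List (String × String) :=
  let fid := PySem.Dict.getD ⟨f⟩ "gate" (PySem.Dict.getD ⟨f⟩ "id" default_id)
  [("kind", "finding"), ("id", fid),
   ("status", PySem.Dict.getD ⟨f⟩ "status" "attention"),
   ("summary", PySem.Dict.getD ⟨f⟩ "summary" (PySem.Dict.getD ⟨f⟩ "message" fid))]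

-- _finding_drilldown_items: loop appending one item per finding
def pvFindingItems (value : Option (List (List (String × String)))) (default_id : String) :
    List (List (String × String)) :=
  (value.getD []).foldl (fun items f => items ++ [pvFindingItem default_id f]) []

-- body of the checks loop of _publication_drilldown
def pvCheckStep (items : List (List (String × String))) (c : List (String × String)) :
    List (List (String × String)) :=
  let status := PySem.Dict.getD ⟨c⟩ "status" "unknown"
  if status == "pass" then items
  else
    let check_id := PySem.Dict.getD ⟨c⟩ "id" (PySem.Dict.getD ⟨c⟩ "gate" "publication")
    items ++ [[("kind", "check"), ("id", check_id), ("status", status),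
               ("summary", PySem.Dict.getD ⟨c⟩ "summary" check_id)]]

-- body of the _dedupe_drilldown loop (state: (seen, deduped))
def pvDedupeStep (st : PySem.Set (String × String) × List (List (String × String)))
    (item : List (String × String)) :
    PySem.Set (String × String) × List (List (String × String)) :=
  let key := (PySem.Dict.getD ⟨item⟩ "id" "", PySem.Dict.getD ⟨item⟩ "summary" "")
  if PySem.Set.contains st.1 key then st else (PySem.Set.add st.1 key, st.2 ++ [item])

def publication_drilldown_py (publication : List (String × List (List (String × String)))) :
    List (List (String × String)) :=
  let items := pvFindingItems (PySem.Dict.get? ⟨publication⟩ "findings") "publication"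
  let items := ((PySem.Dict.get? ⟨publication⟩ "checks").getD []).foldl pvCheckStep items
  ((items.foldl pvDedupeStep (PySem.Set.empty, [])).2).take 8

-- ===== PORT B =====
-- B, transliterated: _finding_cand / _check_cands build (key, item) candidates
-- (comprehension over findings, loop of list-appends over checks), then _take_unique
-- keeps the head, filters its key out of the remainder, and recurses with n - 1.

def pvAltFindingCand (f : List (String × String)) :
    (String × String) × List (String × String) :=
  let fid := PySem.Dict.getD ⟨f⟩ "gate" (PySem.Dict.getD ⟨f⟩ "id" "publication")
  let summary := PySem.Dict.getD ⟨f⟩ "summary" (PySem.Dict.getD ⟨f⟩ "message" fid)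
  ((fid, summary),
   [("kind", "finding"), ("id", fid),
    ("status", PySem.Dict.getD ⟨f⟩ "status" "attention"), ("summary", summary)])

def pvAltCheckCands (c : List (String × String)) :
    List ((String × String) × List (String × String)) :=
  let status := PySem.Dict.getD ⟨c⟩ "status" "unknown"
  if status == "pass" then []
  else
    let cid := PySem.Dict.getD ⟨c⟩ "id" (PySem.Dict.getD ⟨c⟩ "gate" "publication")
    let summary := PySem.Dict.getD ⟨c⟩ "summary" cid
    [((cid, summary),
      [("kind", "check"), ("id", cid), ("status", status), ("summary", summary)])]

-- _take_unique: recursion on the remaining slot count n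
def pvTakeUnique : Nat → List ((String × String) × List (String × String)) →
    List (List (String × String))
  | 0, _ => []
  | _, [] => []
  | n + 1, (key, item) :: rest =>
    item :: pvTakeUnique n (rest.filter (fun c => !(c.1 == key)))

def publication_drilldown_py_alt (publication : List (String × List (List (String × String)))) :
    List (List (String × String)) :=
  let cands := ((PySem.Dict.get? ⟨publication⟩ "findings").getD []).map pvAltFindingCand
  let cands := ((PySem.Dict.get? ⟨publication⟩ "checks").getD []).foldl
    (fun cs c => cs ++ pvAltCheckCands c) cands
  pvTakeUnique 8 cands

-- ===== PRECONDITION & SPEC =====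
def Spec_publication_drilldown_py (publication : List (String × List (List (String × String)))) (out : List (List (String × String))) : Prop := out = publication_drilldown_py_alt publication
instance (publication : List (String × List (List (String × String)))) (out : List (List (String × String))) : Decidable (Spec_publication_drilldown_py publication out) := by unfold Spec_publication_drilldown_py; infer_instance

-- ===== CLAIM (what is proved, stated in full; the proofs are below) =====
def Claim_equal_publication_drilldown_py : Prop := ∀ (publication : List (String × List (List (String × String)))), Dom_publication_drilldown_py publication → Spec_publication_drilldown_py publication (publication_drilldown_py publication)

-- ===== LEMMAS AND PROOFS =====

-- the dedup key A's _dedupe_drilldown extracts from a built item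
def pvKeyOf (item : List (String × String)) : String × String :=
  (PySem.Dict.getD ⟨item⟩ "id" "", PySem.Dict.getD ⟨item⟩ "summary" "")

theorem pvKeyOf_mk (k i s m : String) :
    pvKeyOf [("kind", k), ("id", i), ("status", s), ("summary", m)] = (i, m) := by
  simp [pvKeyOf, PySem.Dict.getD, PySem.Dict.get?]

-- pure version of A's dedupe loop, over items
def pvDedupe : List (List (String × String)) → PySem.Set (String × String) →
    List (List (String × String))
  | [], _ => []
  | it :: rest, seen =>
    if PySem.Set.contains seen (pvKeyOf it) then pvDedupe rest seen
    else it :: pvDedupe rest (PySem.Set.add seen (pvKeyOf it))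

theorem pvDedupe_foldl (items : List (List (String × String)))
    (seen : PySem.Set (String × String)) (acc : List (List (String × String))) :
    (items.foldl pvDedupeStep (seen, acc)).2 = acc ++ pvDedupe items seen := by
  induction items generalizing seen acc with
  | nil => simp [pvDedupe]
  | cons it rest ih =>
    simp only [List.foldl_cons, pvDedupeStep, pvDedupe]
    by_cases h : PySem.Set.contains seen (pvKeyOf it)
    · simp [pvKeyOf] at h ⊢; simp [h, ih]
    · simp [pvKeyOf] at h ⊢; simp [h, ih]

-- the same loop on (key, item) pairs whose key matches pvKeyOf
def pvDedupeP : List ((String × String) × List (String × String)) →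
    PySem.Set (String × String) → List (List (String × String))
  | [], _ => []
  | (k, it) :: rest, seen =>
    if PySem.Set.contains seen k then pvDedupeP rest seen
    else it :: pvDedupeP rest (PySem.Set.add seen k)

theorem pvDedupe_eq_pvDedupeP (cs : List ((String × String) × List (String × String)))
    (seen : PySem.Set (String × String)) (hk : ∀ c ∈ cs, c.1 = pvKeyOf c.2) :
    pvDedupe (cs.map (·.2)) seen = pvDedupeP cs seen := by
  induction cs generalizing seen with
  | nil => rfl
  | cons c rest ih =>
    obtain ⟨k, it⟩ := c
    have hkey : k = pvKeyOf it := hk (k, it) List.mem_cons_self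
    have hrest : ∀ c ∈ rest, c.1 = pvKeyOf c.2 := fun c hc => hk c (List.mem_cons_of_mem _ hc)
    simp only [List.map_cons, pvDedupe, pvDedupeP, ← hkey]
    by_cases h : PySem.Set.contains seen k
    · simp [ih _ hrest]
    · simp [ih _ hrest]

-- erase-based dedup (B's _take_unique without the cap)
def pvFilterDedup : List ((String × String) × List (String × String)) →
    List (List (String × String))
  | [] => []
  | (k, it) :: rest => it :: pvFilterDedup (rest.filter (fun c => !(c.1 == k)))
  termination_by l => l.length
  decreasing_by
    simp only [List.length_unattach, List.length_cons]
    exact Nat.lt_succ_of_le (le_trans (List.length_filter_le _ _) (le_of_eq List.length_attach))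

theorem pvFilterDedup_nil : pvFilterDedup [] = [] := by
  unfold pvFilterDedup; rfl

theorem pvFilterDedup_cons (k : String × String) (it : List (String × String))
    (rest : List ((String × String) × List (String × String))) :
    pvFilterDedup ((k, it) :: rest) =
      it :: pvFilterDedup (rest.filter (fun c => !(c.1 == k))) := by
  conv_lhs => unfold pvFilterDedup

-- membership in an add to a set not containing k
theorem pv_contains_add (seen : PySem.Set (String × String)) (k x : String × String)
    (hk : k ∉ seen) :
    PySem.Set.contains (PySem.Set.add seen k) x =
      (PySem.Set.contains seen x || x == k) := by
  rw [PySem.Set.add_of_not_mem hk]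
  simp [PySem.Set.contains_eq_listContains, Bool.beq_eq_decide_eq]

-- A's seen-set dedupe = B's erase-based dedup on the candidates not yet seen
theorem pvDedupeP_eq_filterDedup (cs : List ((String × String) × List (String × String)))
    (seen : PySem.Set (String × String)) :
    pvDedupeP cs seen = pvFilterDedup (cs.filter (fun c => !(PySem.Set.contains seen c.1))) := by
  induction cs generalizing seen with
  | nil => simp [pvDedupeP, pvFilterDedup_nil]
  | cons c rest ih =>
    obtain ⟨k, it⟩ := c
    by_cases h : PySem.Set.contains seen k = true
    · simp only [pvDedupeP, h, if_true, List.filter_cons, Bool.not_true, Bool.false_eq_true,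
        if_false]
      exact ih seen
    · have hmem : k ∉ seen := by simpa [PySem.Set.contains_iff] using h
      simp only [pvDedupeP, List.filter_cons]
      rw [if_neg h]
      have hb : (!PySem.Set.contains seen k) = true := by
        cases hc : PySem.Set.contains seen k
        · rfl
        · exact absurd hc h
      simp only [hb, if_pos]
      rw [pvFilterDedup_cons, ih]
      congr 1
      rw [List.filter_filter]
      congr 1
      apply List.filter_congr
      intro c _
      rw [pv_contains_add seen k c.1 hmem]
      cases PySem.Set.contains seen c.1 <;> cases hck : (c.1 == k) <;> simp

-- B's capped recursion is the first n entries of the erase-based dedup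
theorem pvTakeUnique_eq_take (n : Nat) (cs : List ((String × String) × List (String × String))) :
    pvTakeUnique n cs = (pvFilterDedup cs).take n := by
  induction n generalizing cs with
  | zero => simp [pvTakeUnique]
  | succ n ih =>
    cases cs with
    | nil => simp [pvTakeUnique, pvFilterDedup_nil]
    | cons c rest =>
      obtain ⟨k, it⟩ := c
      rw [pvTakeUnique, pvFilterDedup_cons, List.take_succ_cons, ih]

-- keys of B's candidates match the keys A's dedupe extracts from the built items
theorem pvAltFindingCand_key (f : List (String × String)) :
    (pvAltFindingCand f).1 = pvKeyOf (pvAltFindingCand f).2 := by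
  simp [pvAltFindingCand, pvKeyOf_mk]

theorem pvAltCheckCands_key (c : List (String × String)) :
    ∀ p ∈ pvAltCheckCands c, p.1 = pvKeyOf p.2 := by
  intro p hp
  unfold pvAltCheckCands at hp
  by_cases h : (PySem.Dict.getD ⟨c⟩ "status" "unknown" == "pass") = true
  · simp [h] at hp
  · simp [h] at hp
    subst hp
    simp [pvKeyOf_mk]

-- the second components of B's candidates are exactly A's items list
theorem pvCand_snd_findings (fs : List (List (String × String)))
    (acc : List (List (String × String))) :
    fs.foldl (fun items f => items ++ [pvFindingItem "publication" f]) acc =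
      acc ++ (fs.map pvAltFindingCand).map (·.2) := by
  induction fs generalizing acc with
  | nil => simp
  | cons f rest ih =>
    simp only [List.foldl_cons, List.map_cons, ih]
    simp [pvFindingItem, pvAltFindingCand]

theorem pvCand_snd_checks (csl : List (List (String × String)))
    (acc : List (List (String × String)))
    (cacc : List ((String × String) × List (String × String)))
    (hacc : acc = cacc.map (·.2)) :
    csl.foldl pvCheckStep acc =
      (csl.foldl (fun cs c => cs ++ pvAltCheckCands c) cacc).map (·.2) := by
  induction csl generalizing acc cacc with
  | nil => simpa using hacc
  | cons c rest ih =>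
    simp only [List.foldl_cons]
    apply ih
    by_cases h : (PySem.Dict.getD ⟨c⟩ "status" "unknown") = "pass"
    · simp [pvCheckStep, pvAltCheckCands, h, hacc]
    · simp [pvCheckStep, pvAltCheckCands, h, hacc]

theorem pvCand_key_foldl (csl : List (List (String × String)))
    (start : List ((String × String) × List (String × String)))
    (hs : ∀ c ∈ start, c.1 = pvKeyOf c.2) :
    ∀ c ∈ csl.foldl (fun cs c => cs ++ pvAltCheckCands c) start, c.1 = pvKeyOf c.2 := by
  induction csl generalizing start with
  | nil => exact hs
  | cons c0 rest ih =>
    rw [List.foldl_cons]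
    apply ih
    intro c hc
    rcases List.mem_append.mp hc with h | h
    · exact hs c h
    · exact pvAltCheckCands_key c0 c h

-- the whole pipeline, generalized over the two extracted lists
theorem pv_main_general (fs csl : List (List (String × String))) :
    ((csl.foldl pvCheckStep
        (fs.foldl (fun items f => items ++ [pvFindingItem "publication" f]) [])).foldl
      pvDedupeStep (PySem.Set.empty, [])).2.take 8 =
    pvTakeUnique 8 (csl.foldl (fun cs c => cs ++ pvAltCheckCands c)
      (fs.map pvAltFindingCand)) := by
  have hk : ∀ c ∈ csl.foldl (fun cs c => cs ++ pvAltCheckCands c) (fs.map pvAltFindingCand),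
      c.1 = pvKeyOf c.2 := by
    apply pvCand_key_foldl
    intro c hc
    obtain ⟨f, _, rfl⟩ := List.mem_map.mp hc
    exact pvAltFindingCand_key f
  have hitems : csl.foldl pvCheckStep
      (fs.foldl (fun items f => items ++ [pvFindingItem "publication" f]) []) =
      (csl.foldl (fun cs c => cs ++ pvAltCheckCands c) (fs.map pvAltFindingCand)).map (·.2) := by
    apply pvCand_snd_checks
    rw [pvCand_snd_findings]
    simp
  rw [hitems, pvDedupe_foldl, List.nil_append, pvDedupe_eq_pvDedupeP _ _ hk,
    pvDedupeP_eq_filterDedup, pvTakeUnique_eq_take]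
  congr 2
  apply List.filter_eq_self.mpr
  intro c _
  rfl

-- ===== VERDICT (by name: the statement is the Claim_ definition above) =====
theorem publication_drilldown_py_spec : Claim_equal_publication_drilldown_py := by
  intro publication _
  unfold Spec_publication_drilldown_py
  unfold publication_drilldown_py publication_drilldown_py_alt pvFindingItems
  exact pv_main_general _ _
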